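-- pv_equiv track=rewrite | github.com/bukdu0602/lab3 | lab3.py | get_pocket_colour
-- ===== SOURCE A (Python) =====
-- def get_pocket_colour(number):
--     """
--     :param number: user input numbers: pocket number between 0-36
--     :return: after evaluate, it will say which color.
--     """
--     number1_10 = 0
--     number10_18 = 10
--     number18_28 = 18
--     number28_36 = 28
--     green = [0]
--     black = []   #this list will be filled as the number go through the functions below
--     red = []    #this list will be filled as the number go through the functions below
--     while number1_10 < 10:  #evaluate number 1-10
--         number1_10 += 1
--         if number1_10 % 2 == 0:
--             black.append(number1_10)
--         else:
--             red.append(number1_10)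
--     while number10_18 < 18:   #evaluate number 10-18
--         number10_18 += 1
--         if number10_18 % 2 == 0:
--             red.append(number10_18)
--         else:
--             black.append(number10_18)
--     while number18_28 <28:   #evaluate number 18-28
--         number18_28 += 1
--         if number18_28 % 2 == 0:
--             black.append(number18_28)
--         else:
--             red.append(number18_28)
--     while number28_36 < 36:  #evaluate number 28-36
--         number28_36 += 1
--         if number28_36 % 2 ==0:
--             red.append(number28_36)
--         else:
--             black.append(number28_36)
--     if number in black:
--         return "black"
--     elif number in red:
--         return "red"
--     elif number in green:
--         return "green"
-- ===== SOURCE B (Python) =====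
-- def get_pocket_colour(number):
--     """
--     :param number: user input numbers: pocket number between 0-36
--     :return: after evaluate, it will say which color.
--     """
--     if number == 0:
--         return "green"
--     if number not in range(1, 37):
--         return None
--     low_group = number in range(1, 11) or number in range(19, 29)
--     return "red" if low_group == (number % 2 == 1) else "black"
-- ===== Notes on version B (the rewrite author's own statement) =====
-- stated objective: simpler
-- what changed: Replaced the four while-loops that build black/red lists and the list-membership lookups by a closed-form parity rule: in the bands 1-10 and 19-28 odd numbers are red, in the other two bands even numbers are red.
import Mathlib
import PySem

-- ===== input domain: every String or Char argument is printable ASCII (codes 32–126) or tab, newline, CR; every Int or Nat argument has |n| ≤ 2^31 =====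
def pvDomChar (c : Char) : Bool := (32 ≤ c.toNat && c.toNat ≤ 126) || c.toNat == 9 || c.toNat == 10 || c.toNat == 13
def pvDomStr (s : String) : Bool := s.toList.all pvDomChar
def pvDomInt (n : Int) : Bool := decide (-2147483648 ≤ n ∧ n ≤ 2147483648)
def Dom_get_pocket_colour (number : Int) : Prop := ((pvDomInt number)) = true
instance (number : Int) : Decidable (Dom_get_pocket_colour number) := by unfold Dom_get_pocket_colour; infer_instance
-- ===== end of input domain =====

-- B replaces A's four list-building while-loops by a closed-form parity rule (objective: simpler).

-- ===== PORT A =====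
-- literal port of A's while loops: counter `c`, bound `stop`, `evenBlack` says whether
-- even numbers go to `black` (loops 1 and 3) or to `red` (loops 2 and 4); fuel makes the
-- same computation total (each loop runs stop - c iterations).
def pvFillLoop : Nat → Int → Int → Bool → List Int → List Int → List Int × List Int
  | 0, _, _, _, black, red => (black, red)
  | fuel + 1, c, stop, evenBlack, black, red =>
    if c < stop then
      let c' := c + 1
      if PySem.Int.mod c' 2 = 0 then
        if evenBlack then pvFillLoop fuel c' stop evenBlack (black ++ [c']) red
        else pvFillLoop fuel c' stop evenBlack black (red ++ [c'])
      else
        if evenBlack then pvFillLoop fuel c' stop evenBlack black (red ++ [c'])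
        else pvFillLoop fuel c' stop evenBlack (black ++ [c']) red
    else (black, red)

def get_pocket_colour (number : Int) : Option String :=
  let green : List Int := [0]
  let st1 := pvFillLoop 10 0 10 true [] []
  let st2 := pvFillLoop 8 10 18 false st1.1 st1.2
  let st3 := pvFillLoop 10 18 28 true st2.1 st2.2
  let st4 := pvFillLoop 8 28 36 false st3.1 st3.2
  let black := st4.1
  let red := st4.2
  if number ∈ black then some "black"
  else if number ∈ red then some "red"
  else if number ∈ green then some "green"
  else none

-- ===== PORT B =====
def get_pocket_colour_alt (number : Int) : Option String :=
  if number = 0 then some "green"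
  else if ¬ (1 ≤ number ∧ number < 37) then none
  else
    let low_group := (1 ≤ number ∧ number < 11) ∨ (19 ≤ number ∧ number < 29)
    if (decide low_group) = (decide (PySem.Int.mod number 2 = 1)) then some "red"
    else some "black"

-- ===== PRECONDITION & SPEC =====
def Spec_get_pocket_colour (number : Int) (out : Option String) : Prop := out = get_pocket_colour_alt number
instance (number : Int) (out : Option String) : Decidable (Spec_get_pocket_colour number out) := by unfold Spec_get_pocket_colour; infer_instance

-- ===== CLAIM (what is proved, stated in full; the proofs are below) =====
def Claim_equal_get_pocket_colour : Prop := ∀ (number : Int), Dom_get_pocket_colour number → Spec_get_pocket_colour number (get_pocket_colour number)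

-- ===== LEMMAS AND PROOFS =====
theorem pvFill_eval :
    (pvFillLoop 8 28 36 false
      (pvFillLoop 10 18 28 true
        (pvFillLoop 8 10 18 false
          (pvFillLoop 10 0 10 true [] []).1 (pvFillLoop 10 0 10 true [] []).2).1
        (pvFillLoop 8 10 18 false
          (pvFillLoop 10 0 10 true [] []).1 (pvFillLoop 10 0 10 true [] []).2).2).1
      (pvFillLoop 10 18 28 true
        (pvFillLoop 8 10 18 false
          (pvFillLoop 10 0 10 true [] []).1 (pvFillLoop 10 0 10 true [] []).2).1
        (pvFillLoop 8 10 18 false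
          (pvFillLoop 10 0 10 true [] []).1 (pvFillLoop 10 0 10 true [] []).2).2).2)
    = ([2, 4, 6, 8, 10, 11, 13, 15, 17, 20, 22, 24, 26, 28, 29, 31, 33, 35],
       [1, 3, 5, 7, 9, 12, 14, 16, 18, 19, 21, 23, 25, 27, 30, 32, 34, 36]) := by
  decide

theorem get_pocket_colour_eval (number : Int) :
    get_pocket_colour number =
      (if number ∈ ([2, 4, 6, 8, 10, 11, 13, 15, 17, 20, 22, 24, 26, 28, 29, 31, 33, 35] : List Int) then some "black"
       else if number ∈ ([1, 3, 5, 7, 9, 12, 14, 16, 18, 19, 21, 23, 25, 27, 30, 32, 34, 36] : List Int) then some "red"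
       else if number ∈ ([0] : List Int) then some "green"
       else none) := by
  simp only [get_pocket_colour, pvFill_eval]

theorem get_pocket_colour_agrees (number : Int) :
    get_pocket_colour number = get_pocket_colour_alt number := by
  by_cases h : 0 ≤ number ∧ number ≤ 36
  · obtain ⟨h1, h2⟩ := h
    interval_cases number <;> decide
  · have halt : get_pocket_colour_alt number = none := by
      simp only [get_pocket_colour_alt]
      rw [if_neg (by omega), if_pos (by omega)]
    rw [get_pocket_colour_eval, halt]
    simp only [List.mem_cons, List.not_mem_nil, or_false]
    split_ifs <;> first | rfl | omega

-- ===== VERDICT (by name: the statement is the Claim_ definition above) =====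
theorem get_pocket_colour_spec : Claim_equal_get_pocket_colour := by
  intro number _
  exact get_pocket_colour_agrees number
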